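-- pv_equiv track=rewrite | github.com/DoubtfulCoder/dna-imputation-ml | knn_levenshtein.py | missing_values_array
-- ===== SOURCE A (Python) =====
-- def missing_values_array(genome, new_genome):
--     correct_values = []
--     i = 0
--     while(i < len(new_genome)):
--         if new_genome[i] == ' ':
--             blank_len = 0
--             for j in range(i, len(new_genome)):
--                 if new_genome[j] == ' ':
--                     blank_len += 1
--                 else:
--                     break
--             correct_values.append(genome[i:i+blank_len])
--             i += blank_len
--         i += 1
--     return correct_values
-- ===== SOURCE B (Python) =====
-- def missing_values_array(genome, new_genome):
--     # Single forward pass: remember where the current blank run started;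
--     # flush genome[start:k] when the run ends (or at the end of new_genome).
--     result = []
--     run_start = None
--     for k, c in enumerate(new_genome):
--         if c == ' ':
--             if run_start is None:
--                 run_start = k
--         else:
--             if run_start is not None:
--                 result.append(genome[run_start:k])
--                 run_start = None
--     if run_start is not None:
--         result.append(genome[run_start:len(new_genome)])
--     return result
-- ===== Notes on version B (the rewrite author's own statement) =====
-- stated objective: alternative
-- what changed: Replaces A's while-loop with an inner blank-counting loop and manual index jumping by a single forward pass over enumerate(new_genome) carrying an optional run-start, flushing genome[start:k] when a blank run ends.
import Mathlib
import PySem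

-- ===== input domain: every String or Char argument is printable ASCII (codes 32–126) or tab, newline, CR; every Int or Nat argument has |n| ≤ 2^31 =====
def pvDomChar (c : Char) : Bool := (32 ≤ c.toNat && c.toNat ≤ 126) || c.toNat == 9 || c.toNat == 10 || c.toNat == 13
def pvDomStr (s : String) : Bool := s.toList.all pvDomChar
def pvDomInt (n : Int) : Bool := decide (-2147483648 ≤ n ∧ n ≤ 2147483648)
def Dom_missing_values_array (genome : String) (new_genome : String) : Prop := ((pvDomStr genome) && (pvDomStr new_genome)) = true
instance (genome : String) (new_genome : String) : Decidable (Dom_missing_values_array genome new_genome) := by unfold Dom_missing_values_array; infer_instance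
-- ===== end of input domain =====

-- B replaces A's while-loop with an inner counting loop and index jumping by a single
-- forward pass over enumerate(new_genome) carrying an optional run-start (alternative
-- decomposition, both O(n); a timing run measured a constant-factor speedup for B).


-- ===== PORT A =====
-- inner 'for j in range(i, len(new_genome)): if new_genome[j] == ' ': blank_len += 1 else: break'
def pvBlankLenA (s : List Char) (j : Nat) : Nat :=
  if h : j < s.length then
    if s[j] = ' ' then pvBlankLenA s (j + 1) + 1 else 0
  else 0
termination_by s.length - j

-- outer 'while i < len(new_genome)' loop
def pvLoopA (genome : String) (s : List Char) (i : Nat) (acc : List String) : List String :=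
  if h : i < s.length then
    if s[i] = ' ' then
      let n := pvBlankLenA s i
      pvLoopA genome s (i + n + 1)
        (acc ++ [PySem.Str.slice genome (some (i : Int)) (some ((i + n : Nat) : Int))])
    else pvLoopA genome s (i + 1) acc
  else acc
termination_by s.length - i

def missing_values_array (genome : String) (new_genome : String) : List String :=
  pvLoopA genome new_genome.toList 0 []

-- ===== PORT B =====
-- loop body of B: state = (result, run_start)
def pvStepB (genome : String) (st : List String × Option Int) (kc : Int × Char) :
    List String × Option Int :=
  if kc.2 = ' ' then
    match st.2 with
    | none => (st.1, some kc.1)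
    | some _ => st
  else
    match st.2 with
    | none => st
    | some r => (st.1 ++ [PySem.Str.slice genome (some r) (some kc.1)], none)

def missing_values_array_alt (genome : String) (new_genome : String) : List String :=
  let s := new_genome.toList
  let res := (PySem.List.enumerate s).foldl (pvStepB genome) ([], none)
  match res.2 with
  | none => res.1
  | some r => res.1 ++ [PySem.Str.slice genome (some r) (some ((s.length : Nat) : Int))]

-- ===== PRECONDITION & SPEC =====
def Spec_missing_values_array (genome : String) (new_genome : String) (out : List String) : Prop := out = missing_values_array_alt genome new_genome
instance (genome : String) (new_genome : String) (out : List String) : Decidable (Spec_missing_values_array genome new_genome out) := by unfold Spec_missing_values_array; infer_instance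

-- ===== CLAIM (what is proved, stated in full; the proofs are below) =====
def Claim_equal_missing_values_array : Prop := ∀ (genome : String) (new_genome : String), Dom_missing_values_array genome new_genome → Spec_missing_values_array genome new_genome (missing_values_array genome new_genome)

-- ===== LEMMAS AND PROOFS =====

-- index-based view of B's fold, processing positions i..s.length-1
def pvFoldB (genome : String) (s : List Char) (i : Nat) (st : List String × Option Int) :
    List String × Option Int :=
  if h : i < s.length then
    pvFoldB genome s (i + 1) (pvStepB genome st ((i : Int), s[i]))
  else st
termination_by s.length - i

-- the foldl over the (index, char) pairs of the suffix from i is pvFoldB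
theorem foldB_eq (genome : String) (s : List Char) (i : Nat) (st : List String × Option Int)
    (hi : i ≤ s.length) :
    (PySem.List.enumerate (s.drop i) (i : Int)).foldl (pvStepB genome) st
      = pvFoldB genome s i st := by
  by_cases h : i < s.length
  · rw [List.drop_eq_getElem_cons h, PySem.List.enumerate_cons, List.foldl_cons]
    rw [show ((i : Int) + 1) = ((i + 1 : Nat) : Int) by push_cast; ring]
    rw [foldB_eq genome s (i + 1) _ (by omega)]
    conv_rhs => unfold pvFoldB
    simp [h]
  · have hnil : s.drop i = [] := List.drop_eq_nil_of_le (by omega)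
    conv_rhs => unfold pvFoldB
    simp [hnil, h]
termination_by s.length - i

-- blank-length facts
theorem blankLen_pos (s : List Char) (i : Nat) (h : i < s.length) (hc : s[i] = ' ') :
    1 ≤ pvBlankLenA s i := by
  unfold pvBlankLenA; simp [h, hc]

theorem blankLen_le (s : List Char) (i : Nat) (h : i ≤ s.length) :
    i + pvBlankLenA s i ≤ s.length := by
  by_cases hi : i < s.length
  · by_cases hc : s[i] = ' '
    · have h2 := blankLen_le s (i + 1) (by omega)
      have hbl : pvBlankLenA s i = pvBlankLenA s (i + 1) + 1 := by
        conv_lhs => unfold pvBlankLenA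
        simp [hi, hc]
      omega
    · have hbl : pvBlankLenA s i = 0 := by
        conv_lhs => unfold pvBlankLenA
        simp [hi, hc]
      omega
  · have hbl : pvBlankLenA s i = 0 := by
      conv_lhs => unfold pvBlankLenA
      simp [hi]
    omega
termination_by s.length - i

theorem blankLen_all (s : List Char) (i j : Nat) (h1 : i ≤ j) (h2 : j < i + pvBlankLenA s i) :
    s[j]? = some ' ' := by
  by_cases hi : i < s.length
  · by_cases hc : s[i] = ' '
    · by_cases hij : i = j
      · subst hij; simp [List.getElem?_eq_getElem hi, hc]
      · have hbl : pvBlankLenA s i = pvBlankLenA s (i + 1) + 1 := by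
          conv_lhs => unfold pvBlankLenA
          simp [hi, hc]
        exact blankLen_all s (i + 1) j (by omega) (by omega)
    · have hbl : pvBlankLenA s i = 0 := by
        conv_lhs => unfold pvBlankLenA
        simp [hi, hc]
      omega
  · have hbl : pvBlankLenA s i = 0 := by
      conv_lhs => unfold pvBlankLenA
      simp [hi]
    omega
termination_by s.length - i

theorem blankLen_end (s : List Char) (i : Nat) :
    i + pvBlankLenA s i = s.length ∨ s[i + pvBlankLenA s i]? ≠ some ' ' := by
  by_cases hi : i < s.length
  · by_cases hc : s[i] = ' '
    · have hbl : pvBlankLenA s i = pvBlankLenA s (i + 1) + 1 := by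
        conv_lhs => unfold pvBlankLenA
        simp [hi, hc]
      rcases blankLen_end s (i + 1) with h1 | h1
      · left; omega
      · right
        have harith : i + pvBlankLenA s i = i + 1 + pvBlankLenA s (i + 1) := by omega
        rw [harith]; exact h1
    · have hbl : pvBlankLenA s i = 0 := by
        conv_lhs => unfold pvBlankLenA
        simp [hi, hc]
      right
      rw [hbl]
      simp [List.getElem?_eq_getElem hi, hc]
  · have hbl : pvBlankLenA s i = 0 := by
      conv_lhs => unfold pvBlankLenA
      simp [hi]
    by_cases he : i = s.length
    · left; omega
    · right
      rw [hbl]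
      have hnone : s[i]? = none := List.getElem?_eq_none_iff.mpr (by omega)
      simp [hnone]
termination_by s.length - i

-- B's fold skips over a blank run without changing state
theorem foldB_run (genome : String) (s : List Char) (i m : Nat) (hm : m ≤ s.length)
    (him : i ≤ m) (hall : ∀ j, i ≤ j → j < m → s[j]? = some ' ')
    (acc : List String) (r : Int) :
    pvFoldB genome s i (acc, some r) = pvFoldB genome s m (acc, some r) := by
  by_cases he : i = m
  · subst he; rfl
  · have hi : i < s.length := by omega
    have hc : s[i] = ' ' := by
      have := hall i (by omega) (by omega)
      rw [List.getElem?_eq_getElem hi] at this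
      exact Option.some.inj this
    conv_lhs => unfold pvFoldB
    simp only [hi, dif_pos]
    have hstep : pvStepB genome (acc, some r) ((i : Int), s[i]) = (acc, some r) := by
      simp [pvStepB, hc]
    rw [hstep]
    exact foldB_run genome s (i + 1) m hm (by omega) (fun j hj1 hj2 => hall j (by omega) hj2) acc r
termination_by m - i

-- main correspondence: A's loop equals B's fold finished off
theorem loopA_eq_foldB (genome : String) (s : List Char) (i : Nat) (acc : List String) :
    pvLoopA genome s i acc =
      (match pvFoldB genome s i (acc, none) with
       | (a, none) => a
       | (a, some r) => a ++ [PySem.Str.slice genome (some r) (some ((s.length : Nat) : Int))]) := by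
  by_cases h : i < s.length
  · by_cases hc : s[i] = ' '
    · have hn1 : 1 ≤ pvBlankLenA s i := blankLen_pos s i h hc
      have hnle : i + pvBlankLenA s i ≤ s.length := blankLen_le s i (by omega)
      -- A takes the whole run and jumps
      conv_lhs => unfold pvLoopA
      simp only [h, dif_pos, hc, if_pos]
      -- B: step at i opens the run
      conv_rhs => unfold pvFoldB
      simp only [h, dif_pos]
      have hstep : pvStepB genome (acc, none) ((i : Int), s[i]) = (acc, some (i : Int)) := by
        simp [pvStepB, hc]
      rw [hstep]
      -- B: the rest of the run leaves the state unchanged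
      rw [foldB_run genome s (i + 1) (i + pvBlankLenA s i) hnle (by omega)
        (fun j hj1 hj2 => blankLen_all s i j (by omega) hj2) acc (i : Int)]
      by_cases hlt : i + pvBlankLenA s i < s.length
      · -- the run ends at a non-blank character
        have hcn : ¬ s[i + pvBlankLenA s i] = ' ' := by
          rcases blankLen_end s i with hend | hend
          · omega
          · rw [List.getElem?_eq_getElem hlt] at hend
            intro hx; exact hend (by rw [hx])
        conv_rhs => unfold pvFoldB
        simp only [hlt, dif_pos]
        have hstep2 : pvStepB genome (acc, some (i : Int))
              (((i + pvBlankLenA s i : Nat) : Int), s[i + pvBlankLenA s i])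
            = (acc ++ [PySem.Str.slice genome (some (i : Int))
                (some ((i + pvBlankLenA s i : Nat) : Int))], none) := by
          simp [pvStepB, hcn]
        rw [hstep2]
        exact loopA_eq_foldB genome s (i + pvBlankLenA s i + 1) _
      · -- the run reaches the end of new_genome
        have hend : i + pvBlankLenA s i = s.length := by omega
        have hfold : pvFoldB genome s (i + pvBlankLenA s i) (acc, some (i : Int))
            = (acc, some (i : Int)) := by
          unfold pvFoldB; simp [hlt]
        have hstop : ¬ i + pvBlankLenA s i + 1 < s.length := by omega
        have hloop : ∀ a : List String, pvLoopA genome s (i + pvBlankLenA s i + 1) a = a := by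
          intro a; unfold pvLoopA; simp [hstop]
        rw [hfold, hloop]
        simp [← hend]
    · conv_lhs => unfold pvLoopA
      simp only [h, dif_pos, hc, if_neg, not_false_iff]
      conv_rhs => unfold pvFoldB
      simp only [h, dif_pos]
      have hstep : pvStepB genome (acc, none) ((i : Int), s[i]) = (acc, none) := by
        simp [pvStepB, hc]
      rw [hstep]
      exact loopA_eq_foldB genome s (i + 1) acc
  · conv_lhs => unfold pvLoopA
    conv_rhs => unfold pvFoldB
    simp [h]
termination_by s.length - i

-- ===== VERDICT (by name: the statement is the Claim_ definition above) =====
theorem missing_values_array_spec : Claim_equal_missing_values_array := by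
  intro genome new_genome _
  unfold Spec_missing_values_array missing_values_array missing_values_array_alt
  have h := foldB_eq genome new_genome.toList 0 ([], none) (by omega)
  simp only [List.drop_zero, Nat.cast_zero] at h
  rw [loopA_eq_foldB]
  simp only [h]
  rcases hr : pvFoldB genome new_genome.toList 0 ([], none) with ⟨a, _ | r⟩ <;> simp
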